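-- pv_equiv track=rewrite | github.com/DiegoValentin1/probabilidad | panda2.py | alaka
-- ===== SOURCE A (Python) =====
-- def alaka(num):
--     h=1
--     while 1==1:
--         if 2**h>=num:
--             break
--         else:
--             h+=1
--     return h
-- ===== SOURCE B (Python) =====
-- def alaka(num):
--     if num <= 2:
--         return 1
--     return (num - 1).bit_length()
-- ===== Notes on version B (the rewrite author's own statement) =====
-- stated objective: simpler
-- what changed: Replaced the incrementing while-loop with a closed form: 1 for num <= 2, else (num-1).bit_length().
import Mathlib
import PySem

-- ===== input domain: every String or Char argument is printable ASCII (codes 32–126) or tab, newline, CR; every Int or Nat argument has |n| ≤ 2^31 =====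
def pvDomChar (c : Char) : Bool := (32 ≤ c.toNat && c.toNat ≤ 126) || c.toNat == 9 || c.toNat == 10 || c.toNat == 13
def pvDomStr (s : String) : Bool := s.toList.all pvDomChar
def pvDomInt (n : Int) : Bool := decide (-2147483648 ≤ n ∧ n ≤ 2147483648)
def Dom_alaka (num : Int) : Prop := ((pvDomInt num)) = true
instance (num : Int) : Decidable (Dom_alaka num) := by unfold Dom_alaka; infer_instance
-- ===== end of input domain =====

-- B replaces A's incrementing while-loop with a closed form (1 for num ≤ 2, else bit_length of num-1); objective: simpler.


-- ===== PORT A =====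
-- A's `while 1==1` loop: h starts at 1 and increments until 2**h >= num.
def alakaLoop (num : Int) (h : Nat) : Nat :=
  if (2:Int) ^ h ≥ num then h else alakaLoop num (h + 1)
termination_by (num - 2 ^ h).toNat
decreasing_by
  have h1 : (1:Int) ≤ 2 ^ h := one_le_pow₀ (by norm_num)
  omega

def alaka (num : Int) : Int := (alakaLoop num 1 : Int)

-- ===== PORT B =====
-- Python's m.bit_length() for m ≥ 1 is Nat.log2 m + 1.
def alaka_alt (num : Int) : Int :=
  if num ≤ 2 then 1 else (Nat.log2 (num - 1).toNat + 1 : Int)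

-- ===== PRECONDITION & SPEC =====
def Spec_alaka (num : Int) (out : Int) : Prop := out = alaka_alt num
instance (num : Int) (out : Int) : Decidable (Spec_alaka num out) := by unfold Spec_alaka; infer_instance

-- ===== CLAIM (what is proved, stated in full; the proofs are below) =====
def Claim_equal_alaka : Prop := ∀ (num : Int), Dom_alaka num → Spec_alaka num (alaka num)

-- ===== LEMMAS AND PROOFS =====

-- Loop characterisation: if every exponent from h up to (but not including) H is too small
-- and 2^H ≥ num, the loop started at h stops exactly at H.
theorem alakaLoop_eq (num : Int) (H : Nat) (hH : (2:Int) ^ H ≥ num) :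
    ∀ d h, h + d = H → (∀ k, h ≤ k → k < H → (2:Int) ^ k < num) → alakaLoop num h = H := by
  intro d
  induction d with
  | zero =>
    intro h he _
    have : h = H := by omega
    subst this
    rw [alakaLoop, if_pos hH]
  | succ d ih =>
    intro h he hk
    have hlt : (2:Int) ^ h < num := hk h le_rfl (by omega)
    rw [alakaLoop, if_neg (by omega)]
    exact ih (h + 1) (by omega) (fun k h1 h2 => hk k (by omega) h2)

theorem alaka_spec : Claim_equal_alaka := by
  intro num _
  unfold Spec_alaka alaka alaka_alt
  by_cases hle : num ≤ 2
  · rw [if_pos hle, alakaLoop, if_pos (by norm_num; omega)]; norm_num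
  · rw [if_neg hle]
    push Not at hle
    set m : Nat := (num - 1).toNat with hm
    have hmn : (m : Int) = num - 1 := by omega
    have hm2 : 2 ≤ m := by omega
    have hne : m ≠ 0 := by omega
    have hub : m < 2 ^ (m.log2 + 1) := (Nat.log2_lt hne).mp (Nat.lt_succ_self _)
    have hlb : 2 ^ m.log2 ≤ m := (Nat.le_log2 hne).mp le_rfl
    have h1 : 1 ≤ m.log2 := (Nat.le_log2 hne).mpr (by omega)
    have heq : alakaLoop num 1 = m.log2 + 1 := by
      apply alakaLoop_eq num (m.log2 + 1)
        (by
          have : ((2 ^ (m.log2 + 1) : Nat) : Int) = (2:Int) ^ (m.log2 + 1) := by push_cast; ring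
          omega)
        m.log2 1 (by omega)
      intro k hk1 hk2
      have : 2 ^ k ≤ m := by
        calc 2 ^ k ≤ 2 ^ m.log2 := Nat.pow_le_pow_right (by norm_num) (by omega)
        _ ≤ m := hlb
      have hc : ((2 ^ k : Nat) : Int) = (2:Int) ^ k := by push_cast; ring
      omega
    rw [heq]; push_cast; ring
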